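-- pv_equiv track=rewrite | github.com/Woobs8/advent_of_code | 2021/15/part2.py | repeat_map
-- ===== SOURCE A (Python) =====
-- def repeat_map(risk_level_map: list, n_times: int) -> list:
--     repeat_horizontally = []
--     for line in risk_level_map:
--         repeated_line = []
--         for i in range(n_times):
--             repeated_line += add_integer(line, i)
--         repeat_horizontally.append(repeated_line)
--     repeated_map = []
--     for i in range(n_times):
--         for line in repeat_horizontally:
--             repeated_map.append(add_integer(line, i))
--     return repeated_map
--
-- def add_integer(collection: list, integer: int) -> list:
--     result = []
--     for item in collection:
--         item += integer
--         if item > 9: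
--             remainder = item % 10
--             item = (item % 10) + 1
--         result.append(item)
--     return result
-- ===== SOURCE B (Python) =====
-- def repeat_map(risk_level_map: list, n_times: int) -> list:
--     def wrap(v):
--         return v % 10 + 1 if v > 9 else v
--     return [[wrap(wrap(item + c) + r) for c in range(n_times) for item in line]
--             for r in range(n_times) for line in risk_level_map]
-- ===== Notes on version B (the rewrite author's own statement) =====
-- stated objective: simpler
-- what changed: Drops A's precomputed repeat_horizontally table and its three accumulator loops; B generates the whole tiled map in one fused nested comprehension, applying the single-wrap helper twice (column then row) per element.
import Mathlib
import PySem

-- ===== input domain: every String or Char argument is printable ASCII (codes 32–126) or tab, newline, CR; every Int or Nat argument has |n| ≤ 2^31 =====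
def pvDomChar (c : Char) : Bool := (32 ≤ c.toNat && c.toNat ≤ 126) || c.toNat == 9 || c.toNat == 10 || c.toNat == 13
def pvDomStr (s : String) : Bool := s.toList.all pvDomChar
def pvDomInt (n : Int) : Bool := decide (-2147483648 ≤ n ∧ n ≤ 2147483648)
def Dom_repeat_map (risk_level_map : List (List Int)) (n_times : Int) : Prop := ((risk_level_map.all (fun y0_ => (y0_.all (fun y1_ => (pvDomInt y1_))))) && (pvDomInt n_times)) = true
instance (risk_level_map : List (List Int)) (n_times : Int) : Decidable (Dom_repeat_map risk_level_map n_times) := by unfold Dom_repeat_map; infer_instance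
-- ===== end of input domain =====

-- B replaces A's precomputed horizontal table and accumulator loops by one fused
-- nested comprehension applying the wrap helper twice per element (simpler decomposition).

-- ===== PORT A =====
def addInteger (collection : List Int) (integer : Int) : List Int :=
  collection.foldl (fun result item =>
    let item := item + integer
    let item := if item > 9 then (PySem.Int.mod item 10) + 1 else item
    result ++ [item]) []

def repeat_map (risk_level_map : List (List Int)) (n_times : Int) : List (List Int) :=
  let repeat_horizontally :=
    risk_level_map.foldl (fun acc line =>
      acc ++ [(PySem.List.pyRange 0 n_times 1).foldl
                (fun repeated_line i => repeated_line ++ addInteger line i) []]) []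
  (PySem.List.pyRange 0 n_times 1).foldl (fun repeated_map i =>
    repeat_horizontally.foldl (fun rm line => rm ++ [addInteger line i]) repeated_map) []

-- ===== PORT B =====
def pvWrap (v : Int) : Int := if v > 9 then PySem.Int.mod v 10 + 1 else v

def repeat_map_alt (risk_level_map : List (List Int)) (n_times : Int) : List (List Int) :=
  (PySem.List.pyRange 0 n_times 1).flatMap (fun r =>
    risk_level_map.map (fun line =>
      (PySem.List.pyRange 0 n_times 1).flatMap (fun c =>
        line.map (fun item => pvWrap (pvWrap (item + c) + r)))))

-- ===== PRECONDITION & SPEC =====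
def Spec_repeat_map (risk_level_map : List (List Int)) (n_times : Int) (out : List (List Int)) : Prop := out = repeat_map_alt risk_level_map n_times
instance (risk_level_map : List (List Int)) (n_times : Int) (out : List (List Int)) : Decidable (Spec_repeat_map risk_level_map n_times out) := by unfold Spec_repeat_map; infer_instance

-- ===== CLAIM (what is proved, stated in full; the proofs are below) =====
def Claim_equal_repeat_map : Prop := ∀ (risk_level_map : List (List Int)) (n_times : Int), Dom_repeat_map risk_level_map n_times → Spec_repeat_map risk_level_map n_times (repeat_map risk_level_map n_times)

-- ===== LEMMAS AND PROOFS =====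

theorem foldl_app_singleton {α β : Type} (f : α → β) (l : List α) (a : List β) :
    l.foldl (fun acc x => acc ++ [f x]) a = a ++ l.map f := by
  induction l generalizing a with
  | nil => simp
  | cons x xs ih => simp [ih, List.append_assoc]

theorem foldl_app_flat {α β : Type} (g : α → List β) (l : List α) (a : List β) :
    l.foldl (fun acc x => acc ++ g x) a = a ++ l.flatMap g := by
  induction l generalizing a with
  | nil => simp
  | cons x xs ih => simp [ih, List.append_assoc]

theorem addInteger_eq_map (l : List Int) (i : Int) :
    addInteger l i = l.map (fun v => pvWrap (v + i)) := by
  simpa [addInteger, pvWrap] using foldl_app_singleton (fun v => pvWrap (v + i)) l []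

theorem repeat_map_spec : Claim_equal_repeat_map := by
  intro rlm n _
  unfold Spec_repeat_map repeat_map repeat_map_alt
  simp only [foldl_app_singleton, foldl_app_flat, List.nil_append, addInteger_eq_map,
    List.map_map, Function.comp_def, List.map_flatMap]
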